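-- pv_equiv track=rewrite | github.com/thelizri/Advent-of-Code | 2023/day13/day13.py | find_vertical_reflection_line
-- ===== SOURCE A (Python) =====
-- def find_vertical_reflection_line(grid, previous):
--     rows = grid.splitlines()
--     row_length = len(rows[0])
--     for column_index in range(row_length - 1):
--         left_column = [row[column_index] for row in rows]
--         right_column = [row[column_index + 1] for row in rows]
--         if left_column == right_column:
--             # Check for a valid reflection line
--             max_check_range = min(column_index + 1, row_length - column_index - 1)
--             is_reflection_line = True
--             for offset in range(1, max_check_range):
--                 left_column_index, right_column_index = (
--                     column_index - offset,
--                     column_index + 1 + offset,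
--                 )
--                 left_column = [row[left_column_index] for row in rows]
--                 right_column = [row[right_column_index] for row in rows]
--                 if left_column != right_column:
--                     is_reflection_line = False
--                     break
--             if is_reflection_line:
--                 result = column_index + 1
--                 if previous and previous != result:
--                     return result
--                 elif not previous:
--                     return result
-- ===== SOURCE B (Python) =====
-- def find_vertical_reflection_line(grid, previous):
--     rows = grid.splitlines()
--     width = len(rows[0])
--     # Filter the candidate split points row by row: a split survives a row only
--     # if that row (restricted to the first-row width) mirrors around it.
--     candidates = list(range(1, width))
--     for row in rows:
--         row = row[:width]
--         candidates = [i for i in candidates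
--                       if all(row[i - 1 - k] == row[i + k]
--                              for k in range(min(i, width - i)))]
--         if not candidates:
--             return None
--     for i in candidates:
--         if previous != i:
--             return i
--     return None
-- ===== Notes on version B (the rewrite author's own statement) =====
-- stated objective: alternative
-- what changed: B inverts the traversal: instead of A's scan over split points that rebuilds and compares whole mirrored columns outward per split, B keeps a candidate set of split points and filters it row by row (each row eliminates the splits it does not mirror around, with early exit when the set empties), then returns the first surviving candidate different from previous.
-- outside the precondition, e.g. on find_vertical_reflection_line('aabb\naa', None): A returns 1, B raises IndexError
import Mathlib
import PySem

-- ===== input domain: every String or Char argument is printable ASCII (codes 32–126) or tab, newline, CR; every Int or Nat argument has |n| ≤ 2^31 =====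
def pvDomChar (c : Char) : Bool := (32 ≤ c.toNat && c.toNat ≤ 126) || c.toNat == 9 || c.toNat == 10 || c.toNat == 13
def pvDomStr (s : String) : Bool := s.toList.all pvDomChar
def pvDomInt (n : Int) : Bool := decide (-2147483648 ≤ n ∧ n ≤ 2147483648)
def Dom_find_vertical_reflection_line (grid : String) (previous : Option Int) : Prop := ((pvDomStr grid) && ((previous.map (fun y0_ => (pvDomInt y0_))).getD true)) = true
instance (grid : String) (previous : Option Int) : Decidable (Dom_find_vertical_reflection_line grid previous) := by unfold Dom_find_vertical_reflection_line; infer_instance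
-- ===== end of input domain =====

-- B inverts the traversal: it keeps a candidate set of split points and filters it row by row
-- (each row eliminates the splits it does not mirror around, early exit when empty), then returns
-- the first surviving candidate different from previous, instead of A's per-split outward column
-- comparisons (objective: alternative).

-- ===== PORT A =====
-- the column at index j, A's `[row[j] for row in rows]`
def pvColumn (rows : List (List Char)) (j : Int) : List Char :=
  rows.map (fun r => PySem.List.pyGetD r j ' ')

def pvTruthy (previous : Option Int) : Bool :=
  match previous with
  | some p => decide (p ≠ 0)
  | none => false

def pvIsReflA (rows : List (List Char)) (ci : Int) (mcr : Int) : Bool :=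
  (PySem.List.pyRange 1 mcr 1).all (fun off =>
    pvColumn rows (ci - off) == pvColumn rows (ci + 1 + off))

def pvLoopA (rows : List (List Char)) (rl : Int) (previous : Option Int) :
    List Int → Option Int
  | [] => none
  | ci :: rest =>
    if pvColumn rows ci = pvColumn rows (ci + 1) then
      if pvIsReflA rows ci (min (ci + 1) (rl - ci - 1)) then
        if pvTruthy previous ∧ previous ≠ some (ci + 1) then some (ci + 1)
        else if ¬ pvTruthy previous then some (ci + 1)
        else pvLoopA rows rl previous rest
      else pvLoopA rows rl previous rest
    else pvLoopA rows rl previous rest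

def find_vertical_reflection_line (grid : String) (previous : Option Int) : Option Int :=
  let rows := (PySem.Str.splitlines grid).map String.toList
  let row_length : Int := (PySem.List.pyGetD rows 0 []).length
  pvLoopA rows row_length previous (PySem.List.pyRange 0 (row_length - 1) 1)

-- ===== PORT B =====
-- does `row` mirror around split point i? (`all(row[i-1-k] == row[i+k] for k in range(...))`)
def pvRowTest (width i : Int) (row : List Char) : Bool :=
  (PySem.List.pyRange 0 (min i (width - i)) 1).all (fun k =>
    PySem.List.pyGetD row (i - 1 - k) ' ' == PySem.List.pyGetD row (i + k) ' ')

-- `for row in rows: candidates = [...]; if not candidates: return None` (empty list ⇒ final loop yields None)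
def pvRowsLoop (width : Int) : List Int → List (List Char) → List Int
  | cand, [] => cand
  | cand, r :: rest =>
    let c2 := cand.filter (fun i => pvRowTest width i (PySem.List.slice r none (some width)))
    if c2.isEmpty then [] else pvRowsLoop width c2 rest

-- `for i in candidates: if previous != i: return i` then `return None`
def pvFirstOk (previous : Option Int) : List Int → Option Int
  | [] => none
  | i :: rest => if previous ≠ some i then some i else pvFirstOk previous rest

def find_vertical_reflection_line_alt (grid : String) (previous : Option Int) : Option Int :=
  let rows := (PySem.Str.splitlines grid).map String.toList
  let width : Int := (PySem.List.pyGetD rows 0 []).length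
  pvFirstOk previous (pvRowsLoop width (PySem.List.pyRange 1 width 1) rows)

-- ===== PRECONDITION & SPEC =====
-- Pre_ excludes the empty grid and ragged grids with a row shorter than the first row: there A
-- raises IndexError except for accidental early returns, and B's per-row indexing raises too.
def Pre_find_vertical_reflection_line (grid : String) (previous : Option Int) : Prop :=
  (PySem.Str.splitlines grid).map String.toList ≠ [] ∧
  ∀ r ∈ (PySem.Str.splitlines grid).map String.toList,
    (((PySem.Str.splitlines grid).map String.toList).headD []).length ≤ r.length

instance (grid : String) (previous : Option Int) : Decidable (Pre_find_vertical_reflection_line grid previous) := by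
  unfold Pre_find_vertical_reflection_line; infer_instance

def pvWitness_find_vertical_reflection_line : String × Option Int := ("#.##.\n#.##.", some 3)

def Spec_find_vertical_reflection_line (grid : String) (previous : Option Int) (out : Option Int) : Prop := out = find_vertical_reflection_line_alt grid previous
instance (grid : String) (previous : Option Int) (out : Option Int) : Decidable (Spec_find_vertical_reflection_line grid previous out) := by unfold Spec_find_vertical_reflection_line; infer_instance

-- ===== CLAIM (what is proved, stated in full; the proofs are below) =====
def Claim_equal_find_vertical_reflection_line : Prop := ∀ (grid : String) (previous : Option Int), Dom_find_vertical_reflection_line grid previous → Pre_find_vertical_reflection_line grid previous → Spec_find_vertical_reflection_line grid previous (find_vertical_reflection_line grid previous)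

-- ===== LEMMAS AND PROOFS =====

theorem pv_all_congr {α : Type} (l : List α) (p q : α → Bool)
    (h : ∀ x ∈ l, p x = q x) : l.all p = l.all q := by
  induction l with
  | nil => rfl
  | cons a t ih => simp_all

-- B's per-row mirror test, characterised pointwise
theorem pvRowTest_iff (width i : Int) (r : List Char) :
    (pvRowTest width i r = true)
    ↔ ∀ k : Nat, (k : Int) < min i (width - i) →
        PySem.List.pyGetD r (i - 1 - k) ' ' = PySem.List.pyGetD r (i + k) ' ' := by
  rw [pvRowTest, List.all_eq_true]
  constructor
  · intro h k hk
    have hmem : ((k : Nat) : Int) ∈ PySem.List.pyRange 0 (min i (width - i)) 1 := by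
      rw [PySem.List.mem_pyRange_one]; constructor <;> omega
    simpa using h _ hmem
  · intro h k hmem
    rw [PySem.List.mem_pyRange_one] at hmem
    have hc : ((k.toNat : Nat) : Int) = k := by omega
    have := h k.toNat (by omega)
    rw [hc] at this
    simpa using this

-- all rows pass B's test at i ⟺ the mirrored columns around i are pairwise equal
theorem pvBfull_iff (rows : List (List Char)) (width i : Int) :
    (rows.all (fun r => pvRowTest width i r) = true)
    ↔ ∀ k : Nat, (k : Int) < min i (width - i) →
        pvColumn rows (i - 1 - k) = pvColumn rows (i + k) := by
  rw [List.all_eq_true]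
  constructor
  · intro h k hk
    unfold pvColumn
    exact List.map_congr_left (fun r hr => (pvRowTest_iff width i r).mp (h r hr) k hk)
  · intro h r hr
    rw [pvRowTest_iff]
    intro k hk
    have := h k hk
    unfold pvColumn at this
    exact List.map_inj_left.mp this r hr

-- A's accept condition (adjacent equal + inner loop), characterised pointwise
theorem pv_acceptA_iff (rows : List (List Char)) (w ci : Int) (h0 : 0 ≤ ci) (h1 : ci < w - 1) :
    (pvColumn rows ci = pvColumn rows (ci + 1) ∧
      pvIsReflA rows ci (min (ci + 1) (w - ci - 1)) = true)
    ↔ ∀ k : Nat, (k : Int) < min (ci + 1) (w - (ci + 1)) →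
        pvColumn rows (ci - k) = pvColumn rows (ci + 1 + k) := by
  have hmm : min (ci + 1) (w - ci - 1) = min (ci + 1) (w - (ci + 1)) := by omega
  rw [pvIsReflA, hmm, List.all_eq_true]
  constructor
  · rintro ⟨hadj, hall⟩ k hk
    match k with
    | 0 => simpa using hadj
    | (k' + 1) =>
      have hmem : ((k' + 1 : Nat) : Int) ∈ PySem.List.pyRange 1 (min (ci + 1) (w - (ci + 1))) 1 := by
        rw [PySem.List.mem_pyRange_one]
        constructor <;> omega
      simpa using hall _ hmem
  · intro h
    constructor
    · simpa using h 0 (by omega)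
    · intro off hoff
      rw [PySem.List.mem_pyRange_one] at hoff
      have hk : ((off.toNat : Nat) : Int) = off := by omega
      have := h off.toNat (by omega)
      rw [hk] at this
      simpa using this

-- A's scan equals "first candidate ≠ previous" over the list of valid splits
theorem pv_loopA_eq (rows : List (List Char)) (w : Int) (prev : Option Int) :
    ∀ m : Nat, ∀ ci : Int, 0 ≤ ci → (w - 1 - ci).toNat ≤ m →
    pvLoopA rows w prev (PySem.List.pyRange ci (w - 1) 1)
      = pvFirstOk prev
          ((PySem.List.pyRange (ci + 1) w 1).filter (fun i => rows.all (fun r => pvRowTest w i r))) := by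
  intro m
  induction m with
  | zero =>
    intro ci h0 hm
    rw [PySem.List.pyRange_one_eq_nil (show w - 1 ≤ ci by omega),
        PySem.List.pyRange_one_eq_nil (show w ≤ ci + 1 by omega)]
    rfl
  | succ m ih =>
    intro ci h0 hm
    by_cases hlt : ci < w - 1
    · rw [PySem.List.pyRange_one_cons hlt, PySem.List.pyRange_one_cons (show ci + 1 < w by omega)]
      have hrec := ih (ci + 1) (by omega) (by omega)
      have hA := pv_acceptA_iff rows w ci h0 hlt
      have hB := pvBfull_iff rows w (ci + 1)
      have hconv : (∀ k : Nat, (k : Int) < min (ci + 1) (w - (ci + 1)) →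
            pvColumn rows (ci + 1 - 1 - k) = pvColumn rows (ci + 1 + k))
          ↔ (∀ k : Nat, (k : Int) < min (ci + 1) (w - (ci + 1)) →
            pvColumn rows (ci - k) = pvColumn rows (ci + 1 + k)) := by
        constructor <;> intro h k hk <;>
          · have := h k hk
            have he : ci + 1 - 1 - (k : Int) = ci - k := by ring
            first
              | (rw [he] at this; exact this)
              | (rw [he]; exact this)
      simp only [pvLoopA, List.filter_cons]
      by_cases hacc : ∀ k : Nat, (k : Int) < min (ci + 1) (w - (ci + 1)) →
          pvColumn rows (ci - k) = pvColumn rows (ci + 1 + k)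
      · obtain ⟨hc1, hc2⟩ := hA.mpr hacc
        rw [if_pos hc1, if_pos hc2, if_pos (hB.mpr (hconv.mpr hacc))]
        simp only [pvFirstOk]
        rcases prev with _ | p
        · simp [pvTruthy]
        · by_cases hp : p = ci + 1
          · subst hp
            have hT : pvTruthy (some (ci + 1)) = true := by
              simp only [pvTruthy, decide_eq_true_eq]; omega
            rw [if_neg (show ¬(pvTruthy (some (ci + 1)) = true ∧ some (ci + 1) ≠ some (ci + 1)) by simp),
                if_neg (show ¬¬(pvTruthy (some (ci + 1)) = true) by simp [hT]),
                if_neg (show ¬(some (ci + 1) ≠ some (ci + 1)) by simp)]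
            exact hrec
          · by_cases hp0 : p = 0
            · subst hp0
              rw [if_neg (show ¬(pvTruthy (some 0) = true ∧ some 0 ≠ some (ci + 1)) by
                    simp [pvTruthy]),
                  if_pos (show ¬(pvTruthy (some 0) = true) by simp [pvTruthy]),
                  if_pos (show some (0 : Int) ≠ some (ci + 1) by
                    intro h; rw [Option.some.injEq] at h; omega)]
            · rw [if_pos (show pvTruthy (some p) = true ∧ some p ≠ some (ci + 1) by
                    exact ⟨by simp [pvTruthy, hp0], by simp [hp]⟩),
                  if_pos (show some p ≠ some (ci + 1) by simp [hp])]
      · have hbf : ¬ (rows.all (fun r => pvRowTest w (ci + 1) r) = true) := fun hb =>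
          hacc (hconv.mp (hB.mp hb))
        rw [if_neg hbf]
        by_cases hc1 : pvColumn rows ci = pvColumn rows (ci + 1)
        · have hc2 : ¬ pvIsReflA rows ci (min (ci + 1) (w - ci - 1)) = true := by
            intro hc2
            exact hacc (hA.mp ⟨hc1, hc2⟩)
          rw [if_pos hc1, if_neg hc2]
          exact hrec
        · rw [if_neg hc1]
          exact hrec
    · rw [PySem.List.pyRange_one_eq_nil (show w - 1 ≤ ci by omega),
          PySem.List.pyRange_one_eq_nil (show w ≤ ci + 1 by omega)]
      rfl

-- truncating a long-enough row does not change the mirror test at an in-range split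
theorem pvGetD_take (r : List Char) (n : Nat) (j : Int) (hj0 : 0 ≤ j) (hjn : j < (n : Int))
    (hn : n ≤ r.length) :
    PySem.List.pyGetD (r.take n) j ' ' = PySem.List.pyGetD r j ' ' := by
  rw [PySem.List.pyGetD_eq_getElem _ _ hj0 (by simp only [List.length_take]; omega),
      PySem.List.pyGetD_eq_getElem _ _ hj0 (by omega)]
  rw [List.getElem_take]

theorem pvRowTest_take (width i : Int) (r : List Char)
    (hr : width.toNat ≤ r.length) (h1 : 1 ≤ i) (hi : i < width) :
    pvRowTest width i (r.take width.toNat) = pvRowTest width i r := by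
  unfold pvRowTest
  apply pv_all_congr
  intro k hk
  rw [PySem.List.mem_pyRange_one] at hk
  rw [pvGetD_take r width.toNat (i - 1 - k) (by omega) (by omega) hr,
      pvGetD_take r width.toNat (i + k) (by omega) (by omega) hr]

-- B's row-by-row candidate filtering equals one filter by "all rows mirror at i"
theorem pvRowsLoop_eq (width : Int) (h0 : 0 ≤ width) :
    ∀ (rows : List (List Char)) (cand : List Int),
    (∀ r ∈ rows, width.toNat ≤ r.length) →
    (∀ i ∈ cand, 1 ≤ i ∧ i < width) →
    pvRowsLoop width cand rows = cand.filter (fun i => rows.all (fun r => pvRowTest width i r)) := by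
  intro rows
  induction rows with
  | nil => intro cand _ _; simp [pvRowsLoop]
  | cons r rest ih =>
    intro cand hlen hcand
    have hrl : width.toNat ≤ r.length := hlen r (by simp)
    have hsl : PySem.List.slice r none (some width) = r.take width.toNat :=
      PySem.List.slice_to r h0
    have htr : cand.filter (fun i => pvRowTest width i (PySem.List.slice r none (some width)))
        = cand.filter (fun i => pvRowTest width i r) := by
      apply List.filter_congr
      intro i hi
      rw [hsl]
      exact pvRowTest_take width i r hrl (hcand i hi).1 (hcand i hi).2
    simp only [pvRowsLoop, htr]
    by_cases he : (cand.filter (fun i => pvRowTest width i r)).isEmpty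
    · rw [if_pos he]
      rw [List.isEmpty_iff, List.filter_eq_nil_iff] at he
      symm
      rw [List.filter_eq_nil_iff]
      intro i hi hall
      rw [List.all_cons, Bool.and_eq_true] at hall
      exact he i hi hall.1
    · rw [if_neg he]
      rw [ih _ (fun r' hr' => hlen r' (by simp [hr']))
            (fun i hi => hcand i (List.mem_of_mem_filter hi))]
      rw [List.filter_filter]
      apply List.filter_congr
      intro i _
      simp [List.all_cons, Bool.and_comm]

theorem pv_combined (rows : List (List Char)) (prev : Option Int) (hne : rows ≠ [])
    (hlen : ∀ r ∈ rows, (rows.headD []).length ≤ r.length) :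
    pvLoopA rows ((PySem.List.pyGetD rows 0 []).length : Int) prev
      (PySem.List.pyRange 0 (((PySem.List.pyGetD rows 0 []).length : Int) - 1) 1)
    = pvFirstOk prev
        (pvRowsLoop ((PySem.List.pyGetD rows 0 []).length : Int)
          (PySem.List.pyRange 1 ((PySem.List.pyGetD rows 0 []).length : Int) 1) rows) := by
  obtain ⟨h, t, hht⟩ := List.exists_cons_of_ne_nil hne
  subst hht
  have hget : PySem.List.pyGetD (h :: t) 0 [] = h := by
    simp [PySem.List.pyGetD_zero_cons]
  rw [hget]
  have h1 := pv_loopA_eq (h :: t) (h.length : Int) prev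
      ((h.length : Int) - 1 - 0).toNat 0 le_rfl le_rfl
  simp only [zero_add] at h1
  rw [h1]
  rw [pvRowsLoop_eq (h.length : Int) (Int.natCast_nonneg _) (h :: t)
        (PySem.List.pyRange 1 (h.length : Int) 1)
        (fun r hr => by
          have := hlen r hr
          simp only [List.headD_cons] at this
          omega)
        (fun i hi => by
          rw [PySem.List.mem_pyRange_one] at hi
          exact ⟨hi.1, hi.2⟩)]

theorem pv_main (grid : String) (previous : Option Int)
    (hpre : Pre_find_vertical_reflection_line grid previous) :
    find_vertical_reflection_line grid previous = find_vertical_reflection_line_alt grid previous := by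
  obtain ⟨hne, hlen⟩ := hpre
  exact pv_combined ((PySem.Str.splitlines grid).map String.toList) previous hne hlen

-- ===== VERDICT (by name: the statement is the Claim_ definition above) =====
theorem find_vertical_reflection_line_spec : Claim_equal_find_vertical_reflection_line := by
  intro grid previous _ hpre
  unfold Spec_find_vertical_reflection_line
  exact pv_main grid previous hpre
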